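-- pv_equiv track=rewrite | github.com/wayne-incorporated/wayne-os | src/third_party/chromiumos-overlay/dev-lang/go/files/pie_wrapper.py | has_ldflags
-- ===== SOURCE A (Python) =====
-- def has_ldflags(argv):
--   """Check if any linker flags are present in argv."""
--   link_flags = set(('-ldflags', '-linkmode', '-buildmode',
--                     '-installsuffix', '-extld', '-extldflags'))
--   if set(argv) & link_flags:
--     return True
--   for arg in argv:
--     for link_flag in link_flags:
--       if arg.startswith(link_flag + '='):
--         return True
--   return False
-- ===== SOURCE B (Python) =====
-- def has_ldflags(argv):
--   """Check if any linker flags are present in argv."""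
--   link_flags = frozenset(('-ldflags', '-linkmode', '-buildmode',
--                           '-installsuffix', '-extld', '-extldflags'))
--   for arg in argv:
--     i = arg.find('=')
--     prefix = arg if i < 0 else arg[:i]
--     if prefix in link_flags:
--       return True
--   return False
-- ===== Notes on version B (the rewrite author's own statement) =====
-- stated objective: faster
-- what changed: Replaces A's two-phase check (set(argv) intersection for exact matches plus a nested loop testing startswith(flag + '=') for every flag) by a single pass that computes each argument's prefix before the first '=' and tests that prefix for set membership once.
import Mathlib
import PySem

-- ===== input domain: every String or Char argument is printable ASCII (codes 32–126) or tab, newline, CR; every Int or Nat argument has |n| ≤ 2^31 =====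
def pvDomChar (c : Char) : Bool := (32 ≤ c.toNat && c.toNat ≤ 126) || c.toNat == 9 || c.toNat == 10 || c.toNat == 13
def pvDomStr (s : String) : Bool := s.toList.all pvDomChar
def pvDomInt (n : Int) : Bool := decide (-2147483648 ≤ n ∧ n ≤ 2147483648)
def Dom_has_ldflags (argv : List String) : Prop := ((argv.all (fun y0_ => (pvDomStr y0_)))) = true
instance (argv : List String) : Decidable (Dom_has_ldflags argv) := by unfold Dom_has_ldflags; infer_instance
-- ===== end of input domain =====

-- B replaces A's set-intersection pass plus nested startswith loop by one pass testing
-- each argument's prefix before the first '=' for set membership (objective: simpler).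

-- ===== PORT A =====
-- the set literal in A
def pvLinkFlagsA : PySem.Set String :=
  PySem.Set.ofList ["-ldflags", "-linkmode", "-buildmode",
                    "-installsuffix", "-extld", "-extldflags"]

-- 'for arg in argv: for link_flag in link_flags: if arg.startswith(link_flag + '='): return True'
-- (the inner loop iterates a Python set with early return; an any over it is order-independent)
def pvLoopA : List String → Bool
  | [] => false
  | arg :: rest =>
      if pvLinkFlagsA.any (fun link_flag => PySem.Str.startswith arg (link_flag ++ "=")) then
        true
      else pvLoopA rest

def has_ldflags (argv : List String) : Bool :=
  if ((PySem.Set.ofList argv).inter pvLinkFlagsA) ≠ [] then true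
  else pvLoopA argv

-- ===== PORT B =====
def pvLinkFlagsB : PySem.Set String :=
  PySem.Set.ofList ["-ldflags", "-linkmode", "-buildmode",
                    "-installsuffix", "-extld", "-extldflags"]

-- 'i = arg.find('='); prefix = arg if i < 0 else arg[:i]'
def pvPrefixB (arg : String) : String :=
  let i := PySem.Str.find arg "="
  if i < 0 then arg else PySem.Str.slice arg none (some i)

def pvLoopB : List String → Bool
  | [] => false
  | arg :: rest =>
      if pvLinkFlagsB.contains (pvPrefixB arg) then true else pvLoopB rest

def has_ldflags_alt (argv : List String) : Bool :=
  pvLoopB argv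

-- ===== PRECONDITION & SPEC =====
def Spec_has_ldflags (argv : List String) (out : Bool) : Prop := out = has_ldflags_alt argv
instance (argv : List String) (out : Bool) : Decidable (Spec_has_ldflags argv out) := by unfold Spec_has_ldflags; infer_instance

-- ===== CLAIM (what is proved, stated in full; the proofs are below) =====
def Claim_equal_has_ldflags : Prop := ∀ (argv : List String), Dom_has_ldflags argv → Spec_has_ldflags argv (has_ldflags argv)

-- ===== LEMMAS AND PROOFS =====

-- A's per-argument predicate: exact match (the set intersection) or 'flag=' prefix (the loops)
def pvHitA (arg : String) : Bool :=
  pvLinkFlagsA.contains arg ||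
    pvLinkFlagsA.any (fun f => PySem.Str.startswith arg (f ++ "="))

lemma pvLoopA_eq_any (l : List String) :
    pvLoopA l = l.any (fun arg => pvLinkFlagsA.any (fun f => PySem.Str.startswith arg (f ++ "="))) := by
  induction l with
  | nil => rfl
  | cons a rest ih =>
      rw [pvLoopA, List.any_cons, ih]
      split_ifs with hp
      · rw [hp, Bool.true_or]
      · rw [Bool.eq_false_iff.mpr hp, Bool.false_or]

lemma pvLoopB_eq_any (l : List String) :
    pvLoopB l = l.any (fun arg => pvLinkFlagsB.contains (pvPrefixB arg)) := by
  induction l with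
  | nil => rfl
  | cons a rest ih =>
      rw [pvLoopB, List.any_cons, ih]
      split_ifs with hp
      · rw [hp, Bool.true_or]
      · rw [Bool.eq_false_iff.mpr hp, Bool.false_or]

lemma pvHitA_eq_true_iff (a : String) :
    pvHitA a = true ↔
      a ∈ pvLinkFlagsA ∨
        ∃ f ∈ (pvLinkFlagsA : List String), PySem.Str.startswith a (f ++ "=") = true := by
  unfold pvHitA
  simp only [Bool.or_eq_true, List.any_eq_true, PySem.Set.contains_iff]

lemma pvA_eq_any (argv : List String) : has_ldflags argv = argv.any pvHitA := by
  unfold has_ldflags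
  rw [pvLoopA_eq_any]
  by_cases h : ((PySem.Set.ofList argv).inter pvLinkFlagsA) = []
  · simp only [ne_eq, h, not_true_eq_false, if_false]
    refine PySem.List.any_congr_mem (fun x hx => ?_)
    have hc : pvLinkFlagsA.contains x = false := by
      refine Bool.eq_false_iff.2 (fun hct => ?_)
      have hm : x ∈ (PySem.Set.ofList argv).inter pvLinkFlagsA :=
        (PySem.Set.mem_inter _ _ _).2
          ⟨(PySem.Set.mem_ofList _ _).2 hx, (PySem.Set.contains_iff _ _).1 hct⟩
      simp [h] at hm
    unfold pvHitA
    rw [hc, Bool.false_or]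
  · simp only [ne_eq, h, not_false_eq_true, if_true]
    obtain ⟨x, hx⟩ := List.exists_mem_of_ne_nil _ h
    obtain ⟨hx1, hx2⟩ := (PySem.Set.mem_inter _ _ _).1 hx
    refine (List.any_eq_true.2 ⟨x, (PySem.Set.mem_ofList _ _).1 hx1, ?_⟩).symm
    exact (pvHitA_eq_true_iff x).2 (Or.inl hx2)

lemma pvEqToList : ("=" : String).toList = ['='] := by decide

-- no link flag contains '='
lemma pvFlagsNoEq : ∀ f ∈ (pvLinkFlagsA : List String), '=' ∉ f.toList := by decide

lemma pvPrefixB_of_neg (arg : String)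
    (h : PySem.Chars.find arg.toList ['='] < 0) : pvPrefixB arg = arg := by
  unfold pvPrefixB
  rw [PySem.Str.find_eq, pvEqToList, if_pos h]

lemma pvPrefixB_toList_of_nonneg (arg : String)
    (h : 0 ≤ PySem.Chars.find arg.toList ['=']) :
    (pvPrefixB arg).toList = arg.toList.take (PySem.Chars.find arg.toList ['=']).toNat := by
  unfold pvPrefixB
  rw [PySem.Str.find_eq, pvEqToList,
    if_neg (by omega : ¬ PySem.Chars.find arg.toList ['='] < 0), PySem.Str.toList_slice]
  simpa using PySem.List.slice_to arg.toList h

-- the key per-argument lemma: B's membership test equals A's two checks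
lemma pvKey (arg : String) : pvLinkFlagsB.contains (pvPrefixB arg) = pvHitA arg := by
  have hBA : pvLinkFlagsB = pvLinkFlagsA := rfl
  rw [Bool.eq_iff_iff, PySem.Set.contains_iff, pvHitA_eq_true_iff, hBA]
  by_cases hneg : PySem.Chars.find arg.toList ['='] < 0
  · -- no '=' in arg: prefix is arg itself, and no startswith can hit
    rw [pvPrefixB_of_neg arg hneg]
    have hfind : PySem.Chars.find arg.toList ['='] = -1 := by
      have := PySem.Chars.neg_one_le_find arg.toList ['=']
      omega
    have hnotin : ¬ (['='] : List Char) <:+: arg.toList :=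
      (PySem.Chars.find_eq_neg_one_iff _ _).1 hfind
    constructor
    · exact Or.inl
    · rintro (hm | ⟨f, hf, hsw⟩)
      · exact hm
      · exfalso
        rw [PySem.Str.startswith_eq] at hsw
        have hpre := (PySem.Chars.startswith_iff _ _).1 hsw
        rw [String.toList_append] at hpre
        exact hnotin ((List.suffix_append f.toList (("=" : String).toList)).isInfix.trans
          hpre.isInfix)
  · -- '=' occurs; let k be its first index
    have hge : 0 ≤ PySem.Chars.find arg.toList ['='] := by omega
    obtain ⟨hpfx, hmin⟩ := PySem.Chars.find_spec (s := arg.toList) (sub := ['=']) hge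
    set k := (PySem.Chars.find arg.toList ['=']).toNat with hk
    have hptl := pvPrefixB_toList_of_nonneg arg hge
    constructor
    · -- prefix ∈ flags → arg starts with prefix + '='
      intro hp
      refine Or.inr ⟨pvPrefixB arg, hp, ?_⟩
      rw [PySem.Str.startswith_eq]
      refine (PySem.Chars.startswith_iff _ _).2 ?_
      rw [String.toList_append, hptl]
      obtain ⟨t, ht⟩ := hpfx
      refine ⟨t, ?_⟩
      have : ("=" : String).toList = ['='] := rfl
      rw [this, List.append_assoc, ht, List.take_append_drop]
    · rintro (hm | ⟨f, hf, hsw⟩)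
      · -- arg itself is a flag: impossible, flags contain no '='
        exfalso
        obtain ⟨t, ht⟩ := hpfx
        have hmd : '=' ∈ List.drop k arg.toList := by
          rw [← ht]; simp
        exact pvFlagsNoEq arg hm (List.mem_of_mem_drop hmd)
      · -- arg = f ++ "=" ++ rest: the first '=' sits right after f, so prefix = f
        rw [PySem.Str.startswith_eq] at hsw
        have hpre := (PySem.Chars.startswith_iff _ _).1 hsw
        rw [String.toList_append] at hpre
        obtain ⟨r, hr⟩ := hpre
        have hr' : arg.toList = f.toList ++ ('=' :: r) := by
          rw [← hr, pvEqToList]; simp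
        have hnoeq := pvFlagsNoEq f hf
        have hdropm : arg.toList.drop f.toList.length = '=' :: r := by
          rw [hr', List.drop_left]
        have hkm : k ≤ f.toList.length := by
          by_contra hlt
          exact hmin f.toList.length (by omega) ⟨r, by rw [hdropm]; rfl⟩
        have hkm2 : ¬ k < f.toList.length := by
          intro hlt
          obtain ⟨t, ht⟩ := hpfx
          have h1 : arg.toList[k]? = some '=' := by
            rw [← List.head?_drop, ← ht]; rfl
          have h2 : arg.toList[k]? = f.toList[k]? := by
            rw [hr', List.getElem?_append_left hlt]
          exact hnoeq (List.mem_of_getElem? (h2 ▸ h1))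
        have hkeq : k = f.toList.length := by omega
        have : (pvPrefixB arg).toList = f.toList := by
          rw [hptl, ← hk, hkeq, hr', List.take_left]
        exact String.toList_inj.1 this ▸ hf

-- ===== VERDICT (by name: the statement is the Claim_ definition above) =====
theorem has_ldflags_spec : Claim_equal_has_ldflags := by
  intro argv _
  unfold Spec_has_ldflags has_ldflags_alt
  rw [pvLoopB_eq_any, pvA_eq_any]
  have hfun : (fun a => pvLinkFlagsB.contains (pvPrefixB a)) = pvHitA := funext pvKey
  rw [hfun]
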